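-- pv_equiv track=rewrite | github.com/mohammadfaiizan/ProjectI | DSA/Theory/String/007_string_two_pointers.py | remove_duplicates_k_times
-- ===== SOURCE A (Python) =====
-- def remove_duplicates_k_times(s: str, k: int) -> str:
--     """Remove duplicates that appear k or more times"""
--     if k <= 1:
--         return ""
--
--     chars = list(s)
--     write = 0
--
--     for read in range(len(chars)):
--         chars[write] = chars[read]
--         write += 1
--
--         # Check if last k characters are same
--         if write >= k and all(chars[write-k+i] == chars[write-1] for i in range(k)):
--             write -= k
--
--     return ''.join(chars[:write])
-- ===== SOURCE B (Python) =====
-- def remove_duplicates_k_times(s: str, k: int) -> str: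
--     """Remove duplicates that appear k or more times (stack of (char,count) runs)."""
--     if k <= 1:
--         return ""
--     stack = []  # list of [char, count], count always < k
--     for c in s:
--         if stack and stack[-1][0] == c:
--             stack[-1][1] += 1
--             if stack[-1][1] == k:
--                 stack.pop()
--         else:
--             stack.append([c, 1])
--     return ''.join(c * n for c, n in stack)
-- ===== Notes on version B (the rewrite author's own statement) =====
-- stated objective: faster
-- what changed: Replaced the write-pointer buffer that re-scans the last k characters after every write with a stack of (char,count) run pairs that pops a run when its count reaches k.
import Mathlib
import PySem

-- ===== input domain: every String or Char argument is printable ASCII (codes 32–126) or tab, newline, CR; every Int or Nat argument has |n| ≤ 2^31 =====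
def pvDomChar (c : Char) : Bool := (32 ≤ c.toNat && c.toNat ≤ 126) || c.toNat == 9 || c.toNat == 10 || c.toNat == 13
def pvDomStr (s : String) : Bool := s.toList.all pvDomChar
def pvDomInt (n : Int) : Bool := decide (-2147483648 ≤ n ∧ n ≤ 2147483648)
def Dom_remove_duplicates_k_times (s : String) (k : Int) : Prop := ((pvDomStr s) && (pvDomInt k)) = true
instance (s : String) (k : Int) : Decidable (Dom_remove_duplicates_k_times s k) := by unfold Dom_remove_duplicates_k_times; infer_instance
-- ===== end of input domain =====

-- B replaces A's buffer with write pointer + last-k rescan by a stack of (char,count) runs (pop on count = k); proved to return the same string on all inputs.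

-- ===== PORT A =====
-- A's loop keeps the invariant chars[:write] (positions ≥ write still hold the original
-- characters, since write ≤ read); we model that prefix as the list `b`.
-- Since k ≥ 2 in the branch, `k.toNat` is exact; indices write-k+i are in range, so getD is exact.
def pvAStep (kn : Nat) (b : List Char) (c : Char) : List Char :=
  let b' := b ++ [c]
  if kn ≤ b'.length ∧
      ((List.range kn).all (fun i => b'.getD (b'.length - kn + i) ' ' == b'.getD (b'.length - 1) ' ')) = true
  then b'.take (b'.length - kn)
  else b'

def remove_duplicates_k_times (s : String) (k : Int) : String :=
  if k ≤ 1 then "" else String.mk (s.toList.foldl (pvAStep k.toNat) [])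

-- ===== PORT B =====
-- stack held top-first (cons = python append at the end); count always < k
def pvBStep (kn : Nat) (st : List (Char × Nat)) (c : Char) : List (Char × Nat) :=
  match st with
  | (c', n) :: rest =>
      if c' == c then (if n + 1 == kn then rest else (c', n + 1) :: rest)
      else (c, 1) :: (c', n) :: rest
  | [] => [(c, 1)]

def remove_duplicates_k_times_alt (s : String) (k : Int) : String :=
  if k ≤ 1 then ""
  else String.mk (((s.toList.foldl (pvBStep k.toNat) []).reverse.map
        (fun p => List.replicate p.2 p.1)).flatten)

-- ===== PRECONDITION & SPEC =====
def Spec_remove_duplicates_k_times (s : String) (k : Int) (out : String) : Prop := out = remove_duplicates_k_times_alt s k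
instance (s : String) (k : Int) (out : String) : Decidable (Spec_remove_duplicates_k_times s k out) := by unfold Spec_remove_duplicates_k_times; infer_instance

-- ===== CLAIM (what is proved, stated in full; the proofs are below) =====
def Claim_equal_remove_duplicates_k_times : Prop := ∀ (s : String) (k : Int), Dom_remove_duplicates_k_times s k → Spec_remove_duplicates_k_times s k (remove_duplicates_k_times s k)

-- ===== LEMMAS AND PROOFS =====

-- the string of characters a stack represents (bottom to top)
def pvR (st : List (Char × Nat)) : List Char :=
  (st.reverse.map (fun p => List.replicate p.2 p.1)).flatten

def pvWF (kn : Nat) (st : List (Char × Nat)) : Prop :=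
  (∀ p ∈ st, 1 ≤ p.2 ∧ p.2 < kn) ∧ st.IsChain (fun p q => p.1 ≠ q.1)

theorem pvR_nil : pvR [] = [] := rfl

theorem pvR_cons (c : Char) (n : Nat) (st : List (Char × Nat)) :
    pvR ((c, n) :: st) = pvR st ++ List.replicate n c := by
  simp [pvR]

theorem pv_getD_last (l : List Char) (n : Nat) (a d : Char) (hn : 1 ≤ n) :
    (l ++ List.replicate n a).getD (l.length + n - 1) d = a := by
  rw [List.getD_eq_getElem?_getD, List.getElem?_append_right (by omega)]
  have : l.length + n - 1 - l.length = n - 1 := by omega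
  rw [this, List.getElem?_replicate]
  simp [show n - 1 < n by omega]

theorem pv_getD_append_left (l m : List Char) (i : Nat) (d : Char) (h : i < l.length) :
    (l ++ m).getD i d = l.getD i d := by
  rw [List.getD_eq_getElem?_getD, List.getD_eq_getElem?_getD, List.getElem?_append_left h]

theorem pv_getD_concat (l : List Char) (x d : Char) : (l ++ [x]).getD l.length d = x := by
  rw [List.getD_eq_getElem?_getD, List.getElem?_append_right (le_refl _)]
  simp

theorem pv_getD_replicate_right (l : List Char) (n i : Nat) (a d : Char) (h : i < n) :
    (l ++ List.replicate n a).getD (l.length + i) d = a := by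
  rw [List.getD_eq_getElem?_getD, List.getElem?_append_right (by omega)]
  simp [show l.length + i - l.length = i by omega, h]

theorem pv_getD_last' (l : List Char) (n : Nat) (a d : Char) (hn : 1 ≤ n) :
    (l ++ List.replicate n a).getD ((l ++ List.replicate n a).length - 1) d = a := by
  rw [List.length_append, List.length_replicate]
  exact pv_getD_last l n a d hn

theorem pvR_length_cons (a : Char) (m : Nat) (r : List (Char × Nat)) :
    (pvR ((a, m) :: r)).length = (pvR r).length + m := by
  simp [pvR_cons]

theorem pv_all_false (kn : Nat) (b' : List Char) (i0 : Nat) (h0 : i0 < kn)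
    (hne : kn ≤ b'.length → b'.getD (b'.length - kn + i0) ' ' ≠ b'.getD (b'.length - 1) ' ') :
    ¬ (kn ≤ b'.length ∧
        ((List.range kn).all
          (fun i => b'.getD (b'.length - kn + i) ' ' == b'.getD (b'.length - 1) ' ')) = true) := by
  rintro ⟨h1, h2⟩
  rw [List.all_eq_true] at h2
  exact hne h1 (by simpa using h2 i0 (List.mem_range.mpr h0))

-- step correspondence: on a well-formed stack, A's step on its string equals B's step
theorem pv_step (kn : Nat) (hk : 2 ≤ kn) (st : List (Char × Nat)) (c : Char)
    (hwf : pvWF kn st) :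
    pvAStep kn (pvR st) c = pvR (pvBStep kn st c) ∧ pvWF kn (pvBStep kn st c) := by
  obtain ⟨hcnt, hch⟩ := hwf
  match st with
  | [] =>
      refine ⟨?_, ?_, ?_⟩
      · rw [pvAStep, pvBStep]
        rw [if_neg]
        · simp [pvR_nil, pvR_cons]
        · rintro ⟨h1, -⟩
          simp [pvR_nil] at h1
          omega
      · simp [pvBStep]; omega
      · simp [pvBStep]
  | (c', n) :: rest =>
      have hn1 : 1 ≤ n := (hcnt _ (List.mem_cons_self)).1
      have hnk : n < kn := (hcnt _ (List.mem_cons_self)).2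
      by_cases hcc : c' = c
      · subst hcc
        -- run of the same char: b' = pvR rest ++ replicate (n+1) c'
        have hb' : pvR ((c', n) :: rest) ++ [c'] = pvR rest ++ List.replicate (n + 1) c' := by
          rw [pvR_cons, List.append_assoc, ← List.replicate_succ' (n := n)]
        by_cases hpop : n + 1 = kn
        · -- run reaches k: A drops the last k chars, B pops
          have hstep : pvBStep kn ((c', n) :: rest) c' = rest := by
            rw [pvBStep]; simp [hpop]
          refine ⟨?_, ?_, ?_⟩
          · rw [pvAStep, hstep]
            simp only [hb']
            rw [if_pos]
            · rw [List.length_append, List.length_replicate, hpop,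
                show (pvR rest).length + kn - kn = (pvR rest).length by omega,
                List.take_left]
            · constructor
              · simp; omega
              · rw [List.all_eq_true]
                intro i hi
                rw [List.mem_range] at hi
                rw [List.length_append, List.length_replicate, beq_iff_eq, hpop,
                  show (pvR rest).length + kn - kn + i = (pvR rest).length + i by omega,
                  show (pvR rest).length + kn - 1 = (pvR rest).length + (kn - 1) by omega,
                  ← hpop]
                rw [pv_getD_replicate_right _ _ _ _ _ (by omega),
                  pv_getD_replicate_right _ _ _ _ _ (by omega)]
          · rw [hstep]
            exact fun p hp => hcnt p (List.mem_cons_of_mem _ hp)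
          · rw [hstep]
            exact hch.tail
        · -- run still below k: A keeps the char, B increments the count
          have hstep : pvBStep kn ((c', n) :: rest) c' = (c', n + 1) :: rest := by
            rw [pvBStep]; simp [hpop]
          refine ⟨?_, ?_, ?_⟩
          · rw [pvAStep, hstep]
            simp only [hb']
            rw [if_neg, pvR_cons]
            -- the char just before the run of n+1 c's ends another run and differs
            refine pv_all_false _ _ (kn - (n + 2)) (by omega) ?_
            rw [List.length_append, List.length_replicate]
            intro hk2
            have hrest : rest ≠ [] := by
              intro h
              rw [h] at hk2
              simp [pvR_nil] at hk2
              omega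
            obtain ⟨⟨c2, m⟩, rest2, rfl⟩ := List.exists_cons_of_ne_nil hrest
            have hm1 : 1 ≤ m := (hcnt (c2, m) (by simp)).1
            have hc2 : c' ≠ c2 := (List.isChain_cons_cons.mp hch).1
            rw [show (pvR ((c2, m) :: rest2)).length + (n + 1) - kn + (kn - (n + 2))
                  = (pvR ((c2, m) :: rest2)).length - 1 by omega,
              show (pvR ((c2, m) :: rest2)).length + (n + 1) - 1
                  = (pvR ((c2, m) :: rest2)).length + (n + 1) - 1 from rfl]
            rw [show (pvR ((c2, m) :: rest2)).length + (n + 1) - 1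
                  = (pvR ((c2, m) :: rest2)).length + ((n + 1) - 1) by omega,
              pv_getD_replicate_right _ _ _ _ _ (by omega),
              pv_getD_append_left _ _ _ _ (by rw [pvR_length_cons]; omega)]
            rw [pvR_cons, pv_getD_last' _ _ _ _ hm1]
            exact fun h => hc2 h.symm
          · rw [hstep]
            intro p hp
            rcases List.mem_cons.mp hp with h | h
            · subst h; exact ⟨by omega, by omega⟩
            · exact hcnt p (List.mem_cons_of_mem _ h)
          · rw [hstep]
            rcases rest with _ | ⟨q, rest2⟩
            · exact List.isChain_singleton _
            · rw [List.isChain_cons_cons] at hch ⊢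
              exact hch
      · -- different char: B starts a new run, A's last-k check cannot hold
        have hstep : pvBStep kn ((c', n) :: rest) c = (c, 1) :: (c', n) :: rest := by
          rw [pvBStep]; simp [hcc]
        refine ⟨?_, ?_, ?_⟩
        · rw [pvAStep, hstep]
          rw [if_neg]
          · simp [pvR_cons, List.append_assoc]
          · -- at position length-2 sits c' ≠ c
            refine pv_all_false _ _ (kn - 2) (by omega) ?_
            rw [List.length_append, List.length_singleton]
            intro hk2
            rw [show (pvR ((c', n) :: rest)).length + 1 - kn + (kn - 2)
                  = (pvR ((c', n) :: rest)).length - 1 by omega,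
              show (pvR ((c', n) :: rest)).length + 1 - 1
                  = (pvR ((c', n) :: rest)).length by omega,
              pv_getD_concat,
              pv_getD_append_left _ _ _ _ (by rw [pvR_length_cons]; omega)]
            rw [pvR_cons, pv_getD_last' _ _ _ _ hn1]
            exact hcc
        · rw [hstep]
          intro p hp
          rcases List.mem_cons.mp hp with h | h
          · subst h; exact ⟨le_refl _, by omega⟩
          · exact hcnt p h
        · rw [hstep, List.isChain_cons_cons]
          exact ⟨fun h => hcc h.symm, hch⟩

theorem pv_fold (kn : Nat) (hk : 2 ≤ kn) (cs : List Char) (st : List (Char × Nat))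
    (hwf : pvWF kn st) :
    cs.foldl (pvAStep kn) (pvR st) = pvR (cs.foldl (pvBStep kn) st) := by
  induction cs generalizing st with
  | nil => rfl
  | cons c cs ih =>
      obtain ⟨h1, h2⟩ := pv_step kn hk st c hwf
      simp only [List.foldl_cons, h1]
      exact ih _ h2

-- ===== VERDICT (by name: the statement is the Claim_ definition above) =====
theorem remove_duplicates_k_times_spec : Claim_equal_remove_duplicates_k_times := by
  intro s k _
  unfold Spec_remove_duplicates_k_times remove_duplicates_k_times remove_duplicates_k_times_alt
  by_cases hk : k ≤ 1
  · simp [hk]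
  · have hkn : 2 ≤ k.toNat := by omega
    simp only [hk, if_false]
    have := pv_fold k.toNat hkn s.toList [] ⟨by simp, List.isChain_nil⟩
    rw [pvR_nil] at this
    rw [this]
    rfl
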